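-- pv_equiv track=rewrite | github.com/va64doman/codility | Challenges/nationalCodingWeek.py | largestString
-- ===== SOURCE A (Python) =====
-- def largestString(S):
--     A = list(S)
--     i = 0
--     while i + 3 <= len(A):
--         if A[i:i+3] == list("abb"):
--             A[i:i+3] = list("baa")
--             i = max(i-2, 0)
--         else: i += 1
--     return ''.join(A)
--     pass
-- ===== SOURCE B (Python) =====
-- def largestString(S):
--     while True:
--         T = S.replace('abb', 'baa')
--         if T == S:
--             return S
--         S = T
-- ===== Notes on version B (the rewrite author's own statement) =====
-- stated objective: simpler
-- what changed: A's in-place backtracking scan (rewrite at i, step back 2) is replaced by repeatedly applying the global replacement S.replace('abb','baa') until a fixpoint; the two agree because the non-overlapping rewrite system abb->baa is confluent and terminating, so the normal form is unique.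
import Mathlib
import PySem

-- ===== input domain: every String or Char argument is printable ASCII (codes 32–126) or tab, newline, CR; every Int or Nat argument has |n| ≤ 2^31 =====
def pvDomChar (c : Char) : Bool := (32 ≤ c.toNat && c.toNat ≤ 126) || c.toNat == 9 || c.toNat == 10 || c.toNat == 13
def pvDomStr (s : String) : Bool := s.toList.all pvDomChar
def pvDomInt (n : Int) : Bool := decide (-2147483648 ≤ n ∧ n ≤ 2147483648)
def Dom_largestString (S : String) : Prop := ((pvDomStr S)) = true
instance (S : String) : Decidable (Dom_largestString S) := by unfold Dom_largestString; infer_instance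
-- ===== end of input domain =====

-- B replaces A's backtracking in-place scan by a repeated global 'abb'→'baa' replacement to a fixpoint
-- (same normal form, by confluence of the non-overlapping rewrite); objective: simpler, not claimed faster.

-- ===== PORT A =====
-- Port notes: Python's list of 1-char strings is List Char; ''.join(A) is String.ofList;
-- the index i (always ≥ 0, Python keeps i = max(i-2, 0)) is a Nat, whose truncated
-- subtraction i - 2 equals Python's max(i - 2, 0); A[i:i+3] is PySem.List.slice;
-- the slice assignment A[i:i+3] = list("baa") is the splice take i ++ baa ++ drop (i+3).

-- helpers cited by the port's decreasing_by
lemma pvSlice3 (A : List Char) (i : Nat) :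
    PySem.List.slice A (some (i : Int)) (some ((i : Int) + 3)) = (A.drop i).take 3 := by
  have h3 : ((i : Int) + 3) = ((i + 3 : Nat) : Int) := by push_cast; ring
  rw [h3, PySem.List.slice_natCast]
  congr 1
  omega

lemma pvDecomp (A : List Char) (i : Nat) (_h : i + 3 ≤ A.length)
    (h2 : (A.drop i).take 3 = ['a', 'b', 'b']) :
    A = A.take i ++ ['a', 'b', 'b'] ++ A.drop (i + 3) := by
  have hd : A.drop i = ['a', 'b', 'b'] ++ A.drop (i + 3) := by
    conv_lhs => rw [← List.take_append_drop 3 (A.drop i)]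
    rw [h2, List.drop_drop]
  conv_lhs => rw [← List.take_append_drop i A, hd]
  simp [List.append_assoc]

lemma pvRewriteCount (A : List Char) (i : Nat) (h : i + 3 ≤ A.length)
    (h2 : (A.drop i).take 3 = ['a', 'b', 'b']) :
    (A.take i ++ ['b', 'a', 'a'] ++ A.drop (i + 3)).count 'b' + 1 = A.count 'b' ∧
    (A.take i ++ ['b', 'a', 'a'] ++ A.drop (i + 3)).length = A.length := by
  constructor
  · conv_rhs => rw [pvDecomp A i h h2]
    simp [List.count_append]
    omega
  · have := pvDecomp A i h h2
    have hl := congrArg List.length this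
    simp at hl ⊢
    omega

def largestStringLoop (A : List Char) (i : Nat) : List Char :=
  if h : i + 3 ≤ A.length then
    if h2 : PySem.List.slice A (some (i : Int)) (some ((i : Int) + 3)) = ['a', 'b', 'b'] then
      largestStringLoop (A.take i ++ ['b', 'a', 'a'] ++ A.drop (i + 3)) (i - 2)
    else
      largestStringLoop A (i + 1)
  else A
termination_by (A.length + 3) * A.count 'b' + (A.length - i)
decreasing_by
  · rw [pvSlice3] at h2
    obtain ⟨hc, hl⟩ := pvRewriteCount A i h h2
    rw [hl, ← hc, Nat.mul_succ]
    omega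
  · omega

def largestString (S : String) : String := String.ofList (largestStringLoop S.toList 0)

-- ===== PORT B =====
-- Port notes: S.replace('abb','baa') is PySem.Str.replace; string equality T == S is String equality.
-- pvPass and the lemmas up to pvReplaceCount are cited by the port's decreasing_by
-- (each replacement pass with at least one occurrence strictly lowers the number of 'b's).

def pvPass : List Char → List Char
  | [] => []
  | c :: t =>
    if c :: t.take 2 = ['a', 'b', 'b'] then 'b' :: 'a' :: 'a' :: pvPass (t.drop 2)
    else c :: pvPass t
termination_by s => s.length
decreasing_by
  all_goals simp

lemma pvGo_spec (fuel : Nat) : ∀ (l acc : List Char), l.length ≤ fuel →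
    PySem.Chars.replace.go ['a', 'b', 'b'] ['b', 'a', 'a'] fuel l acc = acc.reverse ++ pvPass l := by
  induction fuel with
  | zero =>
    intro l acc hl
    have : l = [] := by cases l <;> simp_all
    subst this
    rw [PySem.Chars.replace.go, pvPass]
  | succ fuel ih =>
    intro l acc hl
    cases l with
    | nil => simp [PySem.Chars.replace.go, pvPass]
    | cons c t =>
      by_cases hp : List.isPrefixOf ['a', 'b', 'b'] (c :: t)
      · have hpre : c :: t.take 2 = ['a', 'b', 'b'] := by
          have := (List.isPrefixOf_iff_prefix.mp hp)
          have := List.prefix_iff_eq_take.mp this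
          simpa using this.symm
        have hstep : PySem.Chars.replace.go ['a', 'b', 'b'] ['b', 'a', 'a'] (fuel + 1) (c :: t) acc
            = PySem.Chars.replace.go ['a', 'b', 'b'] ['b', 'a', 'a'] fuel (t.drop 2)
                (['a', 'a', 'b'] ++ acc) := by
          rw [PySem.Chars.replace.go]
          simp [hp]
        have hlen : (t.drop 2).length ≤ fuel := by
          simp only [List.length_cons] at hl
          simp
          omega
        rw [hstep, ih _ _ hlen, pvPass]
        simp [hpre]
      · have hpre : ¬ (c :: t.take 2 = ['a', 'b', 'b']) := by
          intro hEq
          apply hp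
          rw [List.isPrefixOf_iff_prefix, List.prefix_iff_eq_take]
          simpa using hEq.symm
        have hstep : PySem.Chars.replace.go ['a', 'b', 'b'] ['b', 'a', 'a'] (fuel + 1) (c :: t) acc
            = PySem.Chars.replace.go ['a', 'b', 'b'] ['b', 'a', 'a'] fuel t (c :: acc) := by
          rw [PySem.Chars.replace.go]
          simp [hp]
        have hlen : t.length ≤ fuel := by
          simp only [List.length_cons] at hl
          omega
        rw [hstep, ih _ _ hlen, pvPass]
        simp [hpre]

lemma pvReplaceEqPass (s : List Char) :
    PySem.Chars.replace s ['a', 'b', 'b'] ['b', 'a', 'a'] = pvPass s := by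
  rw [PySem.Chars.replace]
  simp only [List.isEmpty_cons, if_neg Bool.false_ne_true]
  simpa using pvGo_spec s.length s [] le_rfl

lemma pvPassCount (s : List Char) : pvPass s = s ∨ (pvPass s).count 'b' < s.count 'b' := by
  fun_induction pvPass s with
  | case1 => left; rfl
  | case2 c t hc ih =>
    right
    have hcEq : c = 'a' ∧ t.take 2 = ['b', 'b'] := by simpa using hc
    have ht : t = 'b' :: 'b' :: t.drop 2 := by
      conv_lhs => rw [← List.take_append_drop 2 t, hcEq.2]
      rfl
    have hle : (pvPass (t.drop 2)).count 'b' ≤ (t.drop 2).count 'b' := by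
      rcases ih with h | h
      · rw [h]
      · omega
    rw [hcEq.1]
    conv_rhs => rw [ht]
    simp only [List.count_cons]
    simp
    omega
  | case3 c t hc ih =>
    rcases ih with h | h
    · left; rw [h]
    · right
      simp only [List.count_cons]
      omega

lemma pvReplaceCount (s : List Char)
    (h : PySem.Chars.replace s ['a', 'b', 'b'] ['b', 'a', 'a'] ≠ s) :
    (PySem.Chars.replace s ['a', 'b', 'b'] ['b', 'a', 'a']).count 'b' < s.count 'b' := by
  rw [pvReplaceEqPass] at h ⊢
  rcases pvPassCount s with h' | h'
  · exact absurd h' h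
  · exact h'

def largestString_alt (S : String) : String :=
  let T := PySem.Str.replace S "abb" "baa"
  if T = S then S else largestString_alt T
termination_by S.toList.count 'b'
decreasing_by
  rename_i hne
  have ht : (PySem.Str.replace S "abb" "baa").toList
      = PySem.Chars.replace S.toList ['a', 'b', 'b'] ['b', 'a', 'a'] := by
    simp [PySem.Str.replace]
  have hne' : PySem.Chars.replace S.toList ['a', 'b', 'b'] ['b', 'a', 'a'] ≠ S.toList := by
    intro hEq
    apply hne
    have : (PySem.Str.replace S "abb" "baa") = String.ofList S.toList := by
      rw [← hEq, ← ht, String.ofList_toList]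
    simpa [String.ofList_toList] using this
  rw [ht]
  exact pvReplaceCount S.toList hne'

-- ===== PRECONDITION & SPEC =====
def Spec_largestString (S : String) (out : String) : Prop := out = largestString_alt S
instance (S : String) (out : String) : Decidable (Spec_largestString S out) := by unfold Spec_largestString; infer_instance

-- ===== CLAIM (what is proved, stated in full; the proofs are below) =====
def Claim_equal_largestString : Prop := ∀ (S : String), Dom_largestString S → Spec_largestString S (largestString S)

-- ===== LEMMAS AND PROOFS =====

-- the one-step rewrite relation 'abb' → 'baa' and its normal forms
def pvRw (x y : List Char) : Prop :=
  ∃ u v, x = u ++ ['a', 'b', 'b'] ++ v ∧ y = u ++ ['b', 'a', 'a'] ++ v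

def pvNF (x : List Char) : Prop := ∀ u v, x ≠ u ++ ['a', 'b', 'b'] ++ v

lemma pvRw_append_left (u : List Char) {x y : List Char} (h : pvRw x y) :
    pvRw (u ++ x) (u ++ y) := by
  obtain ⟨a, v, hx, hy⟩ := h
  exact ⟨u ++ a, v, by simp [hx, List.append_assoc], by simp [hy, List.append_assoc]⟩

lemma pvRtg_append_left (u : List Char) {x y : List Char}
    (h : Relation.ReflTransGen pvRw x y) :
    Relation.ReflTransGen pvRw (u ++ x) (u ++ y) :=
  Relation.ReflTransGen.lift (u ++ ·) (fun _ _ hab => pvRw_append_left u hab) h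

lemma pvPass_rtg (s : List Char) : Relation.ReflTransGen pvRw s (pvPass s) := by
  fun_induction pvPass s with
  | case1 => exact Relation.ReflTransGen.refl
  | case2 c t hc ih =>
    have hcEq : c = 'a' ∧ t.take 2 = ['b', 'b'] := by simpa using hc
    have ht : t = 'b' :: 'b' :: t.drop 2 := by
      conv_lhs => rw [← List.take_append_drop 2 t, hcEq.2]
      rfl
    refine Relation.ReflTransGen.head (b := ['b', 'a', 'a'] ++ t.drop 2)
      ⟨[], t.drop 2, ?_, by simp⟩ ?_
    · rw [hcEq.1]
      conv_lhs => rw [ht]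
      simp
    · simpa using pvRtg_append_left ['b', 'a', 'a'] ih
  | case3 c t hc ih => simpa using pvRtg_append_left [c] ih

lemma pvPass_fix_nf (s : List Char) : pvPass s = s → pvNF s := by
  fun_induction pvPass s with
  | case1 =>
    intro _ u v h
    have := congrArg List.length h
    simp at this
  | case2 c t hc ih =>
    intro h
    have hcEq : c = 'a' ∧ t.take 2 = ['b', 'b'] := by simpa using hc
    rw [hcEq.1] at h
    exact absurd (List.head_eq_of_cons_eq h) (by decide)
  | case3 c t hc ih =>
    intro h u v hx
    have h' : pvPass t = t := List.tail_eq_of_cons_eq h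
    have hnf := ih h'
    cases u with
    | nil =>
      simp at hx
      apply hc
      rw [hx.1]
      have : t.take 2 = ['b', 'b'] := by rw [hx.2]; rfl
      rw [this]
    | cons d u' =>
      have : t = u' ++ ['a', 'b', 'b'] ++ v := by
        have := List.tail_eq_of_cons_eq (by simpa [List.append_assoc] using hx)
        simpa [List.append_assoc] using this
      exact hnf u' v this

-- index view of a redex
lemma pvRedex_getElem {u v x : List Char} (hx : x = u ++ ['a', 'b', 'b'] ++ v) :
    x[u.length]? = some 'a' ∧ x[u.length + 1]? = some 'b' ∧ x[u.length + 2]? = some 'b' := by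
  subst hx
  refine ⟨?_, ?_, ?_⟩ <;>
  · rw [List.append_assoc, List.getElem?_append_right (by omega)]
    simp

-- local confluence: the pattern never overlaps itself
lemma pvDiamond_aux {u1 v1 u2 v2 : List Char} (hlen : u1.length ≤ u2.length)
    (heq : u1 ++ ['a', 'b', 'b'] ++ v1 = u2 ++ ['a', 'b', 'b'] ++ v2) :
    (u1 = u2 ∧ v1 = v2) ∨
      ∃ d, pvRw (u1 ++ ['b', 'a', 'a'] ++ v1) d ∧ pvRw (u2 ++ ['b', 'a', 'a'] ++ v2) d := by
  rcases eq_or_lt_of_le hlen with heqLen | hlt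
  · left
    obtain ⟨h1, h2⟩ := List.append_inj
      (by simpa [List.append_assoc] using heq) heqLen
    refine ⟨h1, ?_⟩
    simpa using h2
  · right
    have hr1 := pvRedex_getElem (x := u1 ++ ['a', 'b', 'b'] ++ v1) rfl
    have hr2 := pvRedex_getElem heq
    have h3 : u1.length + 3 ≤ u2.length := by
      by_contra hno
      have hcase : u2.length = u1.length + 1 ∨ u2.length = u1.length + 2 := by omega
      rcases hcase with hcase | hcase
      · rw [hcase] at hr2
        have := hr1.2.1.symm.trans hr2.1
        simp at this
      · rw [hcase] at hr2
        have := hr1.2.2.symm.trans hr2.1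
        simp at this
    have hpre1 : (u1 ++ ['a', 'b', 'b']) <+: (u1 ++ ['a', 'b', 'b'] ++ v1) := ⟨v1, rfl⟩
    have hpre2 : u2 <+: (u1 ++ ['a', 'b', 'b'] ++ v1) :=
      ⟨['a', 'b', 'b'] ++ v2, by rw [heq]; simp [List.append_assoc]⟩
    have hpre : (u1 ++ ['a', 'b', 'b']) <+: u2 :=
      List.prefix_of_prefix_length_le hpre1 hpre2 (by simp; omega)
    obtain ⟨m, hm⟩ := hpre
    have hv1 : v1 = m ++ ['a', 'b', 'b'] ++ v2 := by
      have h5 := heq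
      rw [← hm] at h5
      have := List.append_cancel_left (by simpa [List.append_assoc] using h5 :
        u1 ++ (['a', 'b', 'b'] ++ v1) = u1 ++ (['a', 'b', 'b'] ++ (m ++ (['a', 'b', 'b'] ++ v2))))
      have := List.append_cancel_left (by simpa using this :
        ['a', 'b', 'b'] ++ v1 = ['a', 'b', 'b'] ++ (m ++ (['a', 'b', 'b'] ++ v2)))
      simpa [List.append_assoc] using this
    refine ⟨u1 ++ ['b', 'a', 'a'] ++ m ++ ['b', 'a', 'a'] ++ v2,
      ⟨u1 ++ ['b', 'a', 'a'] ++ m, v2, ?_, ?_⟩,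
      ⟨u1, m ++ ['b', 'a', 'a'] ++ v2, ?_, ?_⟩⟩
    · rw [hv1]; simp [List.append_assoc]
    · simp [List.append_assoc]
    · rw [← hm]; simp [List.append_assoc]
    · simp [List.append_assoc]

lemma pvCR (a b c : List Char) (hab : pvRw a b) (hac : pvRw a c) :
    ∃ d, Relation.ReflGen pvRw b d ∧ Relation.ReflTransGen pvRw c d := by
  obtain ⟨u1, v1, hx1, hb⟩ := hab
  obtain ⟨u2, v2, hx2, hc⟩ := hac
  have heq : u1 ++ ['a', 'b', 'b'] ++ v1 = u2 ++ ['a', 'b', 'b'] ++ v2 := hx1.symm.trans hx2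
  rcases le_total u1.length u2.length with hlen | hlen
  · rcases pvDiamond_aux hlen heq with ⟨h1, h2⟩ | ⟨d, hd1, hd2⟩
    · subst h1; subst h2
      exact ⟨b, Relation.ReflGen.refl, by rw [hb, ← hc]⟩
    · exact ⟨d, Relation.ReflGen.single (hb ▸ hd1), Relation.ReflTransGen.single (hc ▸ hd2)⟩
  · rcases pvDiamond_aux hlen heq.symm with ⟨h1, h2⟩ | ⟨d, hd1, hd2⟩
    · subst h1; subst h2
      exact ⟨b, Relation.ReflGen.refl, by rw [hb, ← hc]⟩
    · exact ⟨d, Relation.ReflGen.single (hb ▸ hd2), Relation.ReflTransGen.single (hc ▸ hd1)⟩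

lemma pvNF_stop {y d : List Char} (hy : pvNF y) (h : Relation.ReflTransGen pvRw y d) : d = y := by
  rcases Relation.ReflTransGen.cases_head h with h' | ⟨w, hw, _⟩
  · exact h'.symm
  · obtain ⟨u, v, hu, _⟩ := hw
    exact absurd hu (hy u v)

lemma pvUniqueNF {x y z : List Char} (hxy : Relation.ReflTransGen pvRw x y)
    (hxz : Relation.ReflTransGen pvRw x z) (hy : pvNF y) (hz : pvNF z) : y = z := by
  obtain ⟨d, hyd, hzd⟩ := Relation.church_rosser pvCR hxy hxz
  rw [← pvNF_stop hy hyd, ← pvNF_stop hz hzd]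

-- A's scan: invariant 'no redex starts before i'
def pvInv (A : List Char) (i : Nat) : Prop :=
  ∀ u v, A = u ++ ['a', 'b', 'b'] ++ v → i ≤ u.length

lemma pvScan_spec (A : List Char) (i : Nat) :
    pvInv A i →
      Relation.ReflTransGen pvRw A (largestStringLoop A i) ∧ pvNF (largestStringLoop A i) := by
  fun_induction largestStringLoop A i with
  | case1 A i h h2 ih =>
    intro hinv
    rw [pvSlice3] at h2
    have hd := pvDecomp A i h h2
    have hti : (A.take i).length = i := by simp; omega
    have step : pvRw A (A.take i ++ ['b', 'a', 'a'] ++ A.drop (i + 3)) :=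
      ⟨A.take i, A.drop (i + 3), hd, rfl⟩
    have inv' : pvInv (A.take i ++ ['b', 'a', 'a'] ++ A.drop (i + 3)) (i - 2) := by
      intro u v hA'
      by_contra hno
      have hul : u.length + 3 ≤ i := by omega
      have htake1 : (A.take i ++ ['b', 'a', 'a'] ++ A.drop (i + 3)).take i = A.take i := by
        rw [List.take_append, List.take_append]
        simp [hti, List.take_take]
      have htake2 : (u ++ ['a', 'b', 'b'] ++ v).take i
          = u ++ ['a', 'b', 'b'] ++ v.take (i - (u.length + 3)) := by
        rw [List.take_append, List.take_of_length_le (by simp; omega)]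
        congr 1
        simp
      have hAtake : A.take i = u ++ ['a', 'b', 'b'] ++ v.take (i - (u.length + 3)) := by
        rw [← htake1, hA', htake2]
      have hAfull : A = u ++ ['a', 'b', 'b'] ++ (v.take (i - (u.length + 3)) ++ A.drop i) := by
        conv_lhs => rw [← List.take_append_drop i A, hAtake]
        simp [List.append_assoc]
      have := hinv u _ hAfull
      omega
    obtain ⟨hrtg, hnf⟩ := ih inv'
    exact ⟨Relation.ReflTransGen.head step hrtg, hnf⟩
  | case2 A i h h2 ih =>
    intro hinv
    apply ih
    intro u v hA
    have hi := hinv u v hA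
    rcases Nat.lt_or_ge i u.length with hlt | hge
    · omega
    · exfalso
      have hiu : i = u.length := by omega
      apply h2
      rw [pvSlice3, hiu]
      have hdrop : A.drop u.length = ['a', 'b', 'b'] ++ v := by
        rw [hA, List.append_assoc, List.drop_left]
      rw [hdrop]
      rfl
  | case3 A i h =>
    intro hinv
    refine ⟨Relation.ReflTransGen.refl, ?_⟩
    intro u v hA
    have := hinv u v hA
    have hlenA := congrArg List.length hA
    simp at hlenA
    omega

lemma pvAlt_spec (S : String) :
    Relation.ReflTransGen pvRw S.toList (largestString_alt S).toList ∧
      pvNF (largestString_alt S).toList := by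
  fun_induction largestString_alt S with
  | case1 S T hT =>
    have habb : ("abb" : String).toList = ['a', 'b', 'b'] := rfl
    have hbaa : ("baa" : String).toList = ['b', 'a', 'a'] := rfl
    have hTl : (PySem.Str.replace S "abb" "baa").toList = pvPass S.toList := by
      rw [PySem.Str.replace, habb, hbaa, String.toList_ofList, pvReplaceEqPass]
    have hT' : PySem.Str.replace S "abb" "baa" = S := hT
    rw [hT'] at hTl
    exact ⟨Relation.ReflTransGen.refl, pvPass_fix_nf S.toList hTl.symm⟩
  | case2 S T hT ih =>
    have habb : ("abb" : String).toList = ['a', 'b', 'b'] := rfl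
    have hbaa : ("baa" : String).toList = ['b', 'a', 'a'] := rfl
    have hTl : (PySem.Str.replace S "abb" "baa").toList = pvPass S.toList := by
      rw [PySem.Str.replace, habb, hbaa, String.toList_ofList, pvReplaceEqPass]
    refine ⟨Relation.ReflTransGen.trans ?_ ih.1, ih.2⟩
    rw [hTl]
    exact pvPass_rtg S.toList

-- ===== VERDICT (by name: the statement is the Claim_ definition above) =====
theorem largestString_spec : Claim_equal_largestString := by
  intro S _
  unfold Spec_largestString largestString
  have hA := pvScan_spec S.toList 0 (fun u v _ => Nat.zero_le _)
  have hB := pvAlt_spec S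
  have heq : largestStringLoop S.toList 0 = (largestString_alt S).toList :=
    pvUniqueNF hA.1 hB.1 hA.2 hB.2
  rw [heq, String.ofList_toList]
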